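-- pv_equiv track=rewrite | github.com/liangjinghan993/cryptography-fundamentals | sbox线性逼近表/s盒生成.py | poly_gcd
-- ===== SOURCE A (Python) =====
-- def mybin(a: int, bit=8):
--     """
--     返回固定位数为bit的二进制字符串，与bin不同的是前面会补零
--     """
--     a = bin(a)[2:]
--     return "0" * (bit - len(a)) + a
--
-- def poly_div(a: int, b: int):
--     """
--     多项式除法
--     @return: tuple(商的多项式二进制对应的整数, 余数的二进制对应的整数)
--     """
--     divisor = 0
--     aidx = mybin(a, bit=9).index("1")
--     bidx = mybin(b, bit=9).index("1")  # 除数多项式二进制的非零最高位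
--     while (aidx <= bidx):  # 若被除数多项式二进制的非零最高位小于除数的，就代表可以除
--         divisor += 2 ** (bidx - aidx)
--         a ^= b << (bidx - aidx)  # 除数乘以差的次数，两者取异或
--         if a == 0: break  # 若能整除，则得出结果
--         aidx = mybin(a, bit=9).index("1")  # 再得出被除数此时的非零最高位索引
--     return divisor, a
--
-- def poly_mul(a: int, b: int, m: int):
--     """
--     多项式乘法
--     @a: 多项式a二进制形式对应的整数
--     @b: 多项式b二进制形式对应的整数
--     @m: 求余多项式二进制形式对应的整数, 这里没减去 x8
--     @return: 多项式二进制串所对应的int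
--     """
--     m = m - 128 if m > 127 else m
--     bstr = mybin(b)
--     ans = 0
--     if bstr[-1] == "1": ans ^= a  # f(x)*1  时
--     for i in range(1, 8):  # f(x)*xi 时
--         if a > 127:  # 1.若 f(x) 最左侧是 1
--             a <<= 1
--             a = (a - 128) ^ m  # 那么就要左移一位，去掉左侧一，和 m-x8 异或
--         else:
--             a <<= 1  # 否则 只需左移一位
--         if bstr[8 - i - 1] == "1":  # 2.若 g(x) 中对应有这一项，那么结果需要加（异或）这一项
--             ans ^= a
--     return ans
--
-- def poly_gcd(a: int, b: int, m: int):
--     """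
--     @a: 多项式十进制形式
--     @b: 多项式十进制形式
--     @m: 求余余数十进制形式
--     @return: (gcd结果二进制形式, 乘法逆元十进制形式)
--     """
--     r1, r2 = sorted([a, b], reverse=True)
--     w1, w2 = 0, 1
--     while int(r2):
--         divisor = poly_div(r1, r2)
--         r1, r2 = r2, divisor[1]
--         w1, w2 = w2, w1 ^ poly_mul(divisor[0], w2, m)
--
--     return r1, w1
-- ===== SOURCE B (Python) =====
-- def poly_div(a: int, b: int):
--     """GF(2) polynomial division via bit_length arithmetic (no binary strings)."""
--     q = 0
--     while a.bit_length() >= b.bit_length():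
--         sh = a.bit_length() - b.bit_length()
--         q += 1 << sh
--         a ^= b << sh
--         if a == 0:
--             break
--     return q, a
--
--
-- def poly_mul(a: int, b: int, m: int):
--     # identical to the original helper: B changes only the division and the gcd loop
--     def mybin(x: int, bit=8):
--         x = bin(x)[2:]
--         return "0" * (bit - len(x)) + x
--     m = m - 128 if m > 127 else m
--     bstr = mybin(b)
--     ans = 0
--     if bstr[-1] == "1": ans ^= a
--     for i in range(1, 8):
--         if a > 127:
--             a <<= 1
--             a = (a - 128) ^ m
--         else:
--             a <<= 1
--         if bstr[8 - i - 1] == "1":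
--             ans ^= a
--     return ans
--
--
-- def poly_gcd(a: int, b: int, m: int):
--     """Extended-Euclid as a recursion threading the single tracked coefficient."""
--     def ext(r1, r2, w1, w2):
--         if r2 == 0:
--             return r1, w1
--         q, rem = poly_div(r1, r2)
--         return ext(r2, rem, w2, w1 ^ poly_mul(q, w2, m))
--     return ext(max(a, b), min(a, b), 0, 1)
-- ===== Notes on version B (the rewrite author's own statement) =====
-- stated objective: alternative
-- what changed: poly_div finds and aligns leading bits with int.bit_length arithmetic instead of building zero-padded binary strings and calling str.index, and poly_gcd runs the extended-Euclidean recurrence as a recursion threading the single tracked coefficient (seeded with max/min) instead of a while loop over a sorted pair.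
-- outside the precondition, e.g. on poly_gcd(-7, 9, 283): A returns (-1, 4), B returns (-1, 4); on poly_gcd(600, 3, 283): A does not finish within the time limit, B returns (3, 1)
import Mathlib
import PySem

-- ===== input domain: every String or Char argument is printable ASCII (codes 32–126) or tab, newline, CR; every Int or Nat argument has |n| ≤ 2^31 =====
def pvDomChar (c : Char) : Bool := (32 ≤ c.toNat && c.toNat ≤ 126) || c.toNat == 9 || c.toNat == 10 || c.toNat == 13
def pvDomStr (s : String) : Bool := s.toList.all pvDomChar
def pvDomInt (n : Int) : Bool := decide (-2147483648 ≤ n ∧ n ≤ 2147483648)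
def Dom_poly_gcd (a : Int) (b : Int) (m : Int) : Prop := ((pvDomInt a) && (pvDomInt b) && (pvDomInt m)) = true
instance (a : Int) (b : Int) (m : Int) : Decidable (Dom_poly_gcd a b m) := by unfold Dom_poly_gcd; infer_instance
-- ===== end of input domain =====

-- B replaces the 9-bit-string/str.index scanning in poly_div by int.bit_length arithmetic and
-- runs the gcd as a recursion seeded with max/min instead of a while loop over a sorted pair
-- (objective: alternative; same asymptotic cost).


-- ===== PORT A =====
-- mybin(a, bit): "0" * (bit - len(bin(a)[2:])) + bin(a)[2:]  (Nat subtraction clamps at 0 exactly like Python's "0" * negative)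
def mybinChars (a : Int) (bit : Nat) : List Char :=
  List.replicate (bit - ((PySem.Int.toBinChars0b a).drop 2).length) '0' ++ (PySem.Int.toBinChars0b a).drop 2

-- s.index("1") for a one-character needle; ValueError (no '1') is unreachable on the inputs admitted by Pre_, .getD 0 is never taken there
def pyIndex1 (cs : List Char) : Nat := (List.findIdx? (fun c => c = '1') cs).getD 0

-- poly_mul is IDENTICAL in Source A and in Source B (B changes only poly_div and the gcd loop), so both ports share this one transliteration
def poly_mul_py (a : Int) (b : Int) (m : Int) : Int :=
  let m := if m > 127 then m - 128 else m
  let bstr := mybinChars b 8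
  let ans : Int := if PySem.List.pyGetD bstr (-1) ' ' = '1' then PySem.Int.bxor 0 a else 0
  let st := (PySem.List.pyRange 1 8 1).foldl (fun (st : Int × Int) i =>
    let a := if st.1 > 127 then PySem.Int.bxor ((st.1 <<< 1) - 128) m else st.1 <<< 1
    let ans := if PySem.List.pyGetD bstr (8 - i - 1) ' ' = '1' then PySem.Int.bxor st.2 a else st.2
    (a, ans)) (a, ans)
  st.2

-- the while loop of A's poly_div (fuel never runs out on inputs admitted by Pre_: aidx strictly increases towards 9)
def poly_div_A_loop : Nat → Int → Nat → Int → Int → Nat → Int × Int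
  | 0, _, _, divisor, a, _ => (divisor, a)
  | f + 1, b, bidx, divisor, a, aidx =>
    if aidx ≤ bidx then
      if PySem.Int.bxor a (b <<< (bidx - aidx)) = 0 then
        (divisor + 2 ^ (bidx - aidx), PySem.Int.bxor a (b <<< (bidx - aidx)))
      else
        poly_div_A_loop f b bidx (divisor + 2 ^ (bidx - aidx))
          (PySem.Int.bxor a (b <<< (bidx - aidx)))
          (pyIndex1 (mybinChars (PySem.Int.bxor a (b <<< (bidx - aidx))) 9))
    else (divisor, a)

def poly_div_A (a : Int) (b : Int) : Int × Int :=
  poly_div_A_loop 32 b (pyIndex1 (mybinChars b 9)) 0 a (pyIndex1 (mybinChars a 9))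

-- the while loop of A's poly_gcd (fuel never runs out on inputs admitted by Pre_: r2's bit length strictly decreases)
def poly_gcd_A_loop : Nat → Int → Int → Int → Int → Int → Int × Int
  | 0, _, r1, _, w1, _ => (r1, w1)
  | f + 1, m, r1, r2, w1, w2 =>
    if r2 ≠ 0 then
      poly_gcd_A_loop f m r2 (poly_div_A r1 r2).2 w2
        (PySem.Int.bxor w1 (poly_mul_py (poly_div_A r1 r2).1 w2 m))
    else (r1, w1)

def poly_gcd (a : Int) (b : Int) (m : Int) : Int × Int :=
  let s := PySem.List.sorted [a, b] (fun x => x) true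
  poly_gcd_A_loop 64 m (PySem.List.pyGetD s 0 0) (PySem.List.pyGetD s 1 0) 0 1

-- ===== PORT B =====
-- B's poly_div: leading bits located and aligned with bit_length arithmetic, no strings
def poly_div_B_loop : Nat → Int → Int → Int → Int × Int
  | 0, _, q, a => (q, a)
  | f + 1, b, q, a =>
    if PySem.Int.bitLength b ≤ PySem.Int.bitLength a then
      if PySem.Int.bxor a (b <<< (PySem.Int.bitLength a - PySem.Int.bitLength b)) = 0 then
        (q + ((1:Int) <<< (PySem.Int.bitLength a - PySem.Int.bitLength b)),
         PySem.Int.bxor a (b <<< (PySem.Int.bitLength a - PySem.Int.bitLength b)))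
      else
        poly_div_B_loop f b (q + ((1:Int) <<< (PySem.Int.bitLength a - PySem.Int.bitLength b)))
          (PySem.Int.bxor a (b <<< (PySem.Int.bitLength a - PySem.Int.bitLength b)))
    else (q, a)

def poly_div_B (a : Int) (b : Int) : Int × Int := poly_div_B_loop 32 b 0 a

-- B's ext recursion, threading the single tracked coefficient
def poly_gcd_ext : Nat → Int → Int → Int → Int → Int → Int × Int
  | 0, _, r1, _, w1, _ => (r1, w1)
  | f + 1, m, r1, r2, w1, w2 =>
    if r2 = 0 then (r1, w1)
    else
      poly_gcd_ext f m r2 (poly_div_B r1 r2).2 w2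
        (PySem.Int.bxor w1 (poly_mul_py (poly_div_B r1 r2).1 w2 m))

def poly_gcd_alt (a : Int) (b : Int) (m : Int) : Int × Int :=
  poly_gcd_ext 64 m (if b ≤ a then a else b) (if a ≤ b then a else b) 0 1

-- ===== PRECONDITION & SPEC =====
-- Pre_ admits 9-bit operands (the function's GF(2^8) domain), plus the degenerate pairs (equal
-- operands, an operand 0) on which the division is trivial; it excludes the remaining operands
-- outside 0..511, where poly_div's 9-bit-padded string indexing misaligns and A loops forever on
-- almost all of them (on the few where it accidentally terminates, e.g. (-7, 9, 283), the value is
-- an artefact of the misaligned scan). m is unrestricted.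
def Pre_poly_gcd (a : Int) (b : Int) (m : Int) : Prop :=
  (0 ≤ a ∧ a ≤ 511 ∧ 0 ≤ b ∧ b ≤ 511) ∨ (0 ≤ a ∧ a = b) ∨ (0 ≤ a ∧ b = 0) ∨ (0 ≤ b ∧ a = 0)
instance (a : Int) (b : Int) (m : Int) : Decidable (Pre_poly_gcd a b m) := by
  unfold Pre_poly_gcd; infer_instance
def pvWitness_poly_gcd : Int × Int × Int := (283, 7, 283)

def Spec_poly_gcd (a : Int) (b : Int) (m : Int) (out : Int × Int) : Prop := out = poly_gcd_alt a b m
instance (a : Int) (b : Int) (m : Int) (out : Int × Int) : Decidable (Spec_poly_gcd a b m out) := by unfold Spec_poly_gcd; infer_instance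

-- ===== CLAIM (what is proved, stated in full; the proofs are below) =====
def Claim_equal_poly_gcd : Prop := ∀ (a : Int) (b : Int) (m : Int), Dom_poly_gcd a b m → Pre_poly_gcd a b m → Spec_poly_gcd a b m (poly_gcd a b m)

-- ===== LEMMAS AND PROOFS =====

-- for 1 ≤ n ≤ 511, str.index of '1' in the 9-bit-padded binary string is 9 - bit_length
set_option maxRecDepth 100000 in
lemma idx_table : ∀ n : Nat, n < 512 →
    PySem.Int.bitLength (n : Int) ≤ 9 ∧ (n ≠ 0 →
      1 ≤ PySem.Int.bitLength (n : Int) ∧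
      pyIndex1 (mybinChars (n : Int) 9) = 9 - PySem.Int.bitLength (n : Int)) := by
  decide

lemma idxI (a : Int) (h1 : 1 ≤ a) (h2 : a ≤ 511) :
    PySem.Int.bitLength a ≤ 9 ∧ 1 ≤ PySem.Int.bitLength a ∧
    pyIndex1 (mybinChars a 9) = 9 - PySem.Int.bitLength a := by
  obtain ⟨n, rfl⟩ : ∃ n : Nat, a = (n : Int) := ⟨a.toNat, (Int.toNat_of_nonneg (by omega)).symm⟩
  have h := idx_table n (by omega)
  have hn : n ≠ 0 := by omega
  exact ⟨h.1, (h.2 hn).1, (h.2 hn).2⟩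

lemma xor_step_bounds (a b : Int) (ha1 : 1 ≤ a) (ha2 : a ≤ 511) (hb1 : 1 ≤ b)
    (hbla : PySem.Int.bitLength a ≤ 9) (hc : PySem.Int.bitLength b ≤ PySem.Int.bitLength a) :
    0 ≤ PySem.Int.bxor a (b <<< (PySem.Int.bitLength a - PySem.Int.bitLength b)) ∧
    PySem.Int.bxor a (b <<< (PySem.Int.bitLength a - PySem.Int.bitLength b)) ≤ 511 := by
  have hsl : b <<< (PySem.Int.bitLength a - PySem.Int.bitLength b)
      = b * 2 ^ (PySem.Int.bitLength a - PySem.Int.bitLength b) :=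
    Int.shiftLeft_eq b _
  have hbx : (0:Int) ≤ b * 2 ^ (PySem.Int.bitLength a - PySem.Int.bitLength b) := by positivity
  rw [hsl, PySem.Int.bxor_of_nonneg (by omega) hbx]
  have h29 : (2:Nat) ^ 9 = 512 := by norm_num
  have h1 : a.toNat < 2 ^ 9 := by omega
  have h3 : (b * 2 ^ (PySem.Int.bitLength a - PySem.Int.bitLength b)).toNat
      = b.natAbs * 2 ^ (PySem.Int.bitLength a - PySem.Int.bitLength b) := by
    rw [show (b * 2 ^ (PySem.Int.bitLength a - PySem.Int.bitLength b)).toNat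
        = (b * 2 ^ (PySem.Int.bitLength a - PySem.Int.bitLength b)).natAbs by omega,
      Int.natAbs_mul]
    simp [Int.natAbs_pow]
  have h4 : b.natAbs < 2 ^ PySem.Int.bitLength b := PySem.Int.lt_two_pow_bitLength b
  have h5 : b.natAbs * 2 ^ (PySem.Int.bitLength a - PySem.Int.bitLength b) < 2 ^ 9 := by
    calc b.natAbs * 2 ^ (PySem.Int.bitLength a - PySem.Int.bitLength b)
        < 2 ^ PySem.Int.bitLength b * 2 ^ (PySem.Int.bitLength a - PySem.Int.bitLength b) := by
          exact mul_lt_mul_of_pos_right h4 (pow_pos (by norm_num) _)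
      _ = 2 ^ (PySem.Int.bitLength b + (PySem.Int.bitLength a - PySem.Int.bitLength b)) := by
          rw [pow_add]
      _ ≤ 2 ^ 9 := Nat.pow_le_pow_right (by norm_num) (by omega)
  rw [h3]
  have hx := Nat.xor_lt_two_pow h1 h5
  omega

lemma div_loop_eq (f : Nat) : ∀ (b q a : Int), 1 ≤ b → b ≤ 511 → 1 ≤ a → a ≤ 511 →
    poly_div_A_loop f b (pyIndex1 (mybinChars b 9)) q a (pyIndex1 (mybinChars a 9))
      = poly_div_B_loop f b q a
    ∧ 0 ≤ (poly_div_B_loop f b q a).2 ∧ (poly_div_B_loop f b q a).2 ≤ 511 := by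
  induction f with
  | zero =>
    intro b q a _ _ ha1 ha2
    refine ⟨rfl, by simp [poly_div_B_loop]; omega⟩
  | succ f ih =>
    intro b q a hb1 hb2 ha1 ha2
    obtain ⟨hbl9a, hbl1a, hia⟩ := idxI a ha1 ha2
    obtain ⟨hbl9b, hbl1b, hib⟩ := idxI b hb1 hb2
    simp only [poly_div_A_loop, poly_div_B_loop, hia, hib]
    by_cases hc : PySem.Int.bitLength b ≤ PySem.Int.bitLength a
    · have hle : 9 - PySem.Int.bitLength a ≤ 9 - PySem.Int.bitLength b := by omega
      have hsh : 9 - PySem.Int.bitLength b - (9 - PySem.Int.bitLength a)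
          = PySem.Int.bitLength a - PySem.Int.bitLength b := by omega
      have h1s : (1:Int) <<< (PySem.Int.bitLength a - PySem.Int.bitLength b)
          = 2 ^ (PySem.Int.bitLength a - PySem.Int.bitLength b) := by
        rw [Int.shiftLeft_eq, one_mul]
      rw [if_pos hle, if_pos hc, hsh, h1s]
      obtain ⟨hx0, hx511⟩ := xor_step_bounds a b ha1 ha2 hb1 hbl9a hc
      by_cases hz : PySem.Int.bxor a (b <<< (PySem.Int.bitLength a - PySem.Int.bitLength b)) = 0
      · rw [if_pos hz, if_pos hz]
        exact ⟨rfl, by simp [hz]⟩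
      · rw [if_neg hz, if_neg hz, ← hib]
        exact ih b (q + 2 ^ (PySem.Int.bitLength a - PySem.Int.bitLength b)) _ hb1 hb2
          (by omega) hx511
    · have hgt : ¬ (9 - PySem.Int.bitLength a ≤ 9 - PySem.Int.bitLength b) := by omega
      rw [if_neg hgt, if_neg hc]
      exact ⟨rfl, by simp; omega⟩

lemma div_eq (a b : Int) (ha1 : 1 ≤ a) (ha2 : a ≤ 511) (hb1 : 1 ≤ b) (hb2 : b ≤ 511) :
    poly_div_A a b = poly_div_B a b
    ∧ 0 ≤ (poly_div_B a b).2 ∧ (poly_div_B a b).2 ≤ 511 := by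
  unfold poly_div_A poly_div_B
  exact div_loop_eq 32 b 0 a hb1 hb2 ha1 ha2

lemma gcd_loop_eq (f : Nat) : ∀ (m r1 r2 w1 w2 : Int),
    0 ≤ r1 → r1 ≤ 511 → 0 ≤ r2 → r2 ≤ 511 → (r2 ≠ 0 → 1 ≤ r1) →
    poly_gcd_A_loop f m r1 r2 w1 w2 = poly_gcd_ext f m r1 r2 w1 w2 := by
  induction f with
  | zero => intro m r1 r2 w1 w2 _ _ _ _ _; rfl
  | succ f ih =>
    intro m r1 r2 w1 w2 hr10 hr11 hr20 hr21 hne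
    simp only [poly_gcd_A_loop, poly_gcd_ext]
    by_cases hz : r2 = 0
    · simp [hz]
    · obtain ⟨hd, hd0, hd511⟩ := div_eq r1 r2 (hne hz) hr11 (by omega) hr21
      rw [if_pos hz, if_neg hz, hd]
      exact ih m r2 (poly_div_B r1 r2).2 w2 _ hr20 hr21 hd0 hd511 (fun _ => by omega)

lemma divA_self (x : Int) : poly_div_A x x = (1, 0) := by
  rw [poly_div_A, show (32:Nat) = 31 + 1 by norm_num]
  simp [poly_div_A_loop]

lemma divB_self (x : Int) : poly_div_B x x = (1, 0) := by
  rw [poly_div_B, show (32:Nat) = 31 + 1 by norm_num]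
  simp [poly_div_B_loop]

lemma loopA_zero (f : Nat) (m r1 w1 w2 : Int) :
    poly_gcd_A_loop (f + 1) m r1 0 w1 w2 = (r1, w1) := by
  simp [poly_gcd_A_loop]

lemma loopB_zero (f : Nat) (m r1 w1 w2 : Int) :
    poly_gcd_ext (f + 1) m r1 0 w1 w2 = (r1, w1) := by
  simp [poly_gcd_ext]

lemma gcd_tie (f : Nat) (m x w1 w2 : Int) :
    poly_gcd_A_loop (f + 1 + 1) m x x w1 w2 = poly_gcd_ext (f + 1 + 1) m x x w1 w2 := by
  by_cases hx : x = 0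
  · subst hx
    simp [poly_gcd_A_loop, poly_gcd_ext]
  · simp only [poly_gcd_A_loop, poly_gcd_ext, divA_self, divB_self]
    rw [if_pos hx, if_neg hx]
    simp

lemma sorted_pair (a b : Int) :
    PySem.List.sorted [a, b] (fun x => x) true = if a < b then [b, a] else [a, b] := by
  simp only [PySem.List.sorted, List.foldl, PySem.List.insertBy]
  split_ifs <;> simp_all

theorem poly_gcd_spec : Claim_equal_poly_gcd := by
  unfold Claim_equal_poly_gcd Spec_poly_gcd
  intro a b m _ hpre
  unfold poly_gcd poly_gcd_alt
  rw [sorted_pair]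
  rcases hpre with ⟨ha0, ha1, hb0, hb1⟩ | ⟨ha0, rfl⟩ | ⟨ha0, rfl⟩ | ⟨hb0, rfl⟩
  · by_cases h : a < b
    · rw [if_pos h]
      have hmax : (if b ≤ a then a else b) = b := by split_ifs <;> omega
      have hmin : (if a ≤ b then a else b) = a := by split_ifs <;> omega
      rw [hmax, hmin]
      simp only [PySem.List.pyGetD_zero_cons, show ((1:Int)) = ((1:Nat):Int) by norm_num,
        PySem.List.pyGetD_natCast, List.getD_cons_succ, List.getD_cons_zero]
      exact gcd_loop_eq 64 m b a 0 1 (by omega) hb1 ha0 ha1 (fun _ => by omega)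
    · rw [if_neg h]
      have hmax : (if b ≤ a then a else b) = a := by split_ifs <;> omega
      have hmin : (if a ≤ b then a else b) = b := by split_ifs <;> omega
      rw [hmax, hmin]
      simp only [PySem.List.pyGetD_zero_cons, show ((1:Int)) = ((1:Nat):Int) by norm_num,
        PySem.List.pyGetD_natCast, List.getD_cons_succ, List.getD_cons_zero]
      exact gcd_loop_eq 64 m a b 0 1 ha0 ha1 hb0 hb1 (fun _ => by omega)
  · -- equal operands: one trivial division step
    rw [if_neg (lt_irrefl a)]
    simp only [PySem.List.pyGetD_zero_cons, show ((1:Int)) = ((1:Nat):Int) by norm_num,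
      PySem.List.pyGetD_natCast, if_pos (le_refl a)]
    rw [show (64:Nat) = 62 + 1 + 1 by norm_num]
    exact gcd_tie 62 m a 0 1
  · -- b = 0: both loops exit at once
    rw [if_neg (by omega : ¬ a < 0)]
    have hmax : (if (0:Int) ≤ a then a else 0) = a := by split_ifs <;> omega
    have hmin : (if a ≤ (0:Int) then a else 0) = 0 := by split_ifs <;> omega
    rw [hmax, hmin]
    simp only [PySem.List.pyGetD_zero_cons, show ((1:Int)) = ((1:Nat):Int) by norm_num,
      PySem.List.pyGetD_natCast, List.getD_cons_succ, List.getD_cons_zero]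
    rw [show (64:Nat) = 63 + 1 by norm_num, loopA_zero, loopB_zero]
  · -- a = 0: both loops exit at once
    have hmax : (if b ≤ (0:Int) then 0 else b) = b := by split_ifs <;> omega
    have hmin : (if (0:Int) ≤ b then 0 else b) = 0 := by split_ifs <;> omega
    rw [hmax, hmin]
    by_cases hb : 0 < b
    · rw [if_pos hb]
      simp only [PySem.List.pyGetD_zero_cons, show ((1:Int)) = ((1:Nat):Int) by norm_num,
        PySem.List.pyGetD_natCast, List.getD_cons_succ, List.getD_cons_zero]
      rw [show (64:Nat) = 63 + 1 by norm_num, loopA_zero, loopB_zero]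
    · have hb0' : b = 0 := by omega
      subst hb0'
      rw [if_neg (lt_irrefl 0)]
      simp only [PySem.List.pyGetD_zero_cons, show ((1:Int)) = ((1:Nat):Int) by norm_num,
        PySem.List.pyGetD_natCast, List.getD_cons_succ, List.getD_cons_zero]
      rw [show (64:Nat) = 63 + 1 by norm_num, loopA_zero, loopB_zero]

-- ===== VERDICT (by name: the statement is the Claim_ definition above) =====
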